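-- pv_equiv track=rewrite | github.com/marcosgabrielms/GRADUACAO-ADS-IFPI | Algoritmos/Beecrowd/Bee #03 - Iterações e Coleções/bee1239.py | traduzir_linha_para_html
-- ===== SOURCE A (Python) =====
-- def traduzir_linha_para_html(linha_texto):
--
--     em_italico = False
--     em_negrito = False
--     partes_saida = []
--
--     for caractere in linha_texto:
--         if caractere == '_':
--             if not em_italico:
--                 partes_saida.append('<i>')
--                 em_italico = True
--             else:
--                 partes_saida.append('</i>')
--                 em_italico = False
--
--         elif caractere == '*':
--             if not em_negrito:
--                 partes_saida.append('<b>')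
--                 em_negrito = True
--             else:
--                 partes_saida.append('</b>')
--                 em_negrito = False
--         else:
--             partes_saida.append(caractere)
--     return "".join(partes_saida)
-- ===== SOURCE B (Python) =====
-- def traduzir_linha_para_html(linha_texto):
--     # Stateless rewrite: each marker's replacement is determined by the parity of
--     # how many times that marker occurred before it, via a tag-pair table.
--     tags = {'_': ('<i>', '</i>'), '*': ('<b>', '</b>')}
--     pieces = []
--     for i, c in enumerate(linha_texto):
--         t = tags.get(c)
--         if t is None:
--             pieces.append(c)
--         else:
--             pieces.append(t[linha_texto.count(c, 0, i) % 2])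
--     return ''.join(pieces)
-- ===== Notes on version B (the rewrite author's own statement) =====
-- stated objective: alternative
-- what changed: Replaces A's two mutable toggle flags and nested if/else with a stateless per-position rule: a tag-pair table indexed by the parity of the marker's count in the preceding prefix.
import Mathlib
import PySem

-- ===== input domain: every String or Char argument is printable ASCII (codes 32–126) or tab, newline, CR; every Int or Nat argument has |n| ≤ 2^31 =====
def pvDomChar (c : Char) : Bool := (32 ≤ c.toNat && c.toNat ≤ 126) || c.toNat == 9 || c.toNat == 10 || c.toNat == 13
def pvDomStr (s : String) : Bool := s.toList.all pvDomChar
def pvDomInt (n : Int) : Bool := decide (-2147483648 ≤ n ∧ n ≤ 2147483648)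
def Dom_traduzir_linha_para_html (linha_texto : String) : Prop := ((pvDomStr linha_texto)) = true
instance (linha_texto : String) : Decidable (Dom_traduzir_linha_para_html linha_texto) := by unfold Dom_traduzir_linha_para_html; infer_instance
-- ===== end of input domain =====

-- B replaces A's two mutable toggle flags by a stateless per-position rule (tag chosen by
-- the parity of the marker's prefix count, via a tag-pair table); objective: alternative.


-- ===== PORT A =====
-- loop body of A: state = (em_italico, em_negrito, partes_saida)
def pvStepA (st : Bool × Bool × List String) (c : Char) : Bool × Bool × List String :=
  if c = '_' then
    if !st.1 then (true, st.2.1, st.2.2 ++ ["<i>"]) else (false, st.2.1, st.2.2 ++ ["</i>"])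
  else if c = '*' then
    if !st.2.1 then (st.1, true, st.2.2 ++ ["<b>"]) else (st.1, false, st.2.2 ++ ["</b>"])
  else
    (st.1, st.2.1, st.2.2 ++ [String.ofList [c]])

def traduzir_linha_para_html (linha_texto : String) : String :=
  String.join (linha_texto.toList.foldl pvStepA (false, false, [])).2.2

-- ===== PORT B =====
-- tags.get(c) on the two-key literal dict, then t[k % 2]; ported as a direct match on the keys
def pvTagB (c : Char) (k : Nat) : String :=
  if c = '_' then (if k % 2 = 0 then "<i>" else "</i>")
  else if c = '*' then (if k % 2 = 0 then "<b>" else "</b>")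
  else String.ofList [c]

-- linha_texto.count(c, 0, i) = count of the single character c in the first i characters
def traduzir_linha_para_html_alt (linha_texto : String) : String :=
  let l := linha_texto.toList
  String.join ((PySem.List.enumerate l).map (fun p => pvTagB p.2 ((l.take p.1.toNat).count p.2)))

-- ===== PRECONDITION & SPEC =====
def Spec_traduzir_linha_para_html (linha_texto : String) (out : String) : Prop := out = traduzir_linha_para_html_alt linha_texto
instance (linha_texto : String) (out : String) : Decidable (Spec_traduzir_linha_para_html linha_texto out) := by unfold Spec_traduzir_linha_para_html; infer_instance

-- ===== CLAIM (what is proved, stated in full; the proofs are below) =====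
def Claim_equal_traduzir_linha_para_html : Prop := ∀ (linha_texto : String), Dom_traduzir_linha_para_html linha_texto → Spec_traduzir_linha_para_html linha_texto (traduzir_linha_para_html linha_texto)

-- ===== LEMMAS AND PROOFS =====

-- invariant: after processing l, A's flags are the parities of the marker counts and
-- A's pieces are exactly B's per-position pieces for l
lemma pv_main (l : List Char) :
    l.foldl pvStepA (false, false, []) =
      (decide (l.count '_' % 2 = 1), decide (l.count '*' % 2 = 1),
       (PySem.List.enumerate l).map (fun p => pvTagB p.2 ((l.take p.1.toNat).count p.2))) := by
  induction l using List.reverseRecOn with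
  | nil => simp [PySem.List.enumerate_nil]
  | append_singleton l c ih =>
    rw [List.foldl_append, ih]
    have henum : PySem.List.enumerate (l ++ [c]) =
        PySem.List.enumerate l ++ [((l.length : Int), c)] := by
      rw [PySem.List.enumerate_append]
      simp [PySem.List.enumerate_cons, PySem.List.enumerate_nil]
    have hmap : ((PySem.List.enumerate (l ++ [c])).map
          (fun p => pvTagB p.2 (((l ++ [c]).take p.1.toNat).count p.2))) =
        ((PySem.List.enumerate l).map (fun p => pvTagB p.2 ((l.take p.1.toNat).count p.2)))
          ++ [pvTagB c (l.count c)] := by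
      rw [henum, List.map_append]
      congr 1
      · apply List.map_congr_left
        intro p hp
        rcases (PySem.List.mem_enumerate_iff _ _ _).1 hp with ⟨k, hk, rfl⟩
        have h0 : ((0 : Int) + (k : Int)).toNat = k := by simp
        rw [h0, List.take_append_of_le_length (le_of_lt hk)]
      · simp
    rw [hmap]
    by_cases hc : c = '_'
    · subst hc
      by_cases h : l.count '_' % 2 = 1
      · have h1 : (l.count '_' + 1) % 2 ≠ 1 := by omega
        have h2 : l.count '_' % 2 ≠ 0 := by omega
        simp [pvStepA, pvTagB, List.count_append, h, h1]
      · have h1 : (l.count '_' + 1) % 2 = 1 := by omega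
        have h2 : l.count '_' % 2 = 0 := by omega
        simp [pvStepA, pvTagB, List.count_append, h1, h2]
    · by_cases hc2 : c = '*'
      · subst hc2
        by_cases h : l.count '*' % 2 = 1
        · have h1 : (l.count '*' + 1) % 2 ≠ 1 := by omega
          have h2 : l.count '*' % 2 ≠ 0 := by omega
          simp [pvStepA, pvTagB, List.count_append, hc, h, h1]
        · have h1 : (l.count '*' + 1) % 2 = 1 := by omega
          have h2 : l.count '*' % 2 = 0 := by omega
          simp [pvStepA, pvTagB, List.count_append, hc, h1, h2]
      · simp [pvStepA, pvTagB, List.count_append, hc, hc2]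

-- ===== VERDICT (by name: the statement is the Claim_ definition above) =====
theorem traduzir_linha_para_html_spec : Claim_equal_traduzir_linha_para_html := by
  intro s _
  unfold Spec_traduzir_linha_para_html traduzir_linha_para_html traduzir_linha_para_html_alt
  rw [pv_main]
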